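-- pv_equiv track=rewrite | github.com/oussamahadjaissafekhar/DBAssist | backend/Paritioning_system/WorkloadAnalyzer/Functions/database/getTableName.py | get_table_name
-- ===== SOURCE A (Python) =====
-- def get_table_name(tables,attribute):
--     table_name = ""
--     if attribute == "lo":
--         table_name = "lineorder"
--     else :
--         for table in tables:
--             if table.startswith(attribute):
--                 table_name = table
--     return table_name
-- ===== SOURCE B (Python) =====
-- def get_table_name(tables, attribute):
--     if attribute == "lo":
--         return "lineorder"
--     i = len(tables) - 1
--     while i >= 0:
--         if tables[i].startswith(attribute):
--             return tables[i]
--         i -= 1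
--     return ""
-- ===== Notes on version B (the rewrite author's own statement) =====
-- stated objective: alternative
-- what changed: Instead of scanning all tables forward and overwriting an accumulator, B walks an explicit index backward from the end and returns at the first match (early exit), defaulting to "".
import Mathlib
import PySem

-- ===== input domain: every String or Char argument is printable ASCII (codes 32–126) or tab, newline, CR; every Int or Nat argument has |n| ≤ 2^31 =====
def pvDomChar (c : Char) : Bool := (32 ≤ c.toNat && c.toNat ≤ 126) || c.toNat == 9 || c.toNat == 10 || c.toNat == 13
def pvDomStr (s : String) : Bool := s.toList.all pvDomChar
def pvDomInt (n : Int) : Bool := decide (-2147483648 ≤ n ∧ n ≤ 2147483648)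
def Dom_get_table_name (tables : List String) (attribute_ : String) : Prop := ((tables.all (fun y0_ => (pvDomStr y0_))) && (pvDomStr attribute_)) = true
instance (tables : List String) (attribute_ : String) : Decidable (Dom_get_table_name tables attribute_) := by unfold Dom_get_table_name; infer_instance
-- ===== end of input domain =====

-- B walks an explicit index backward from the end with early exit instead of A's forward scan overwriting an accumulator; same value, alternative structure.

-- ===== PORT A =====
def get_table_name (tables : List String) (attribute_ : String) : String :=
  if attribute_ == "lo" then "lineorder"
  else tables.foldl (fun table_name table =>
    if PySem.Str.startswith table attribute_ then table else table_name) ""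

-- ===== PORT B =====
-- backward while-loop of Source B: fuel n means current index i = n - 1; stops when i < 0
def scanBack (tables : List String) (attribute_ : String) : Nat → String
  | 0 => ""
  | n + 1 =>
      match tables[n]? with
      | some t => if PySem.Str.startswith t attribute_ then t else scanBack tables attribute_ n
      | none => scanBack tables attribute_ n

def get_table_name_alt (tables : List String) (attribute_ : String) : String :=
  if attribute_ == "lo" then "lineorder"
  else scanBack tables attribute_ tables.length

-- ===== PRECONDITION & SPEC =====
def Spec_get_table_name (tables : List String) (attribute_ : String) (out : String) : Prop := out = get_table_name_alt tables attribute_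
instance (tables : List String) (attribute_ : String) (out : String) : Decidable (Spec_get_table_name tables attribute_ out) := by unfold Spec_get_table_name; infer_instance

-- ===== CLAIM (what is proved, stated in full; the proofs are below) =====
def Claim_equal_get_table_name : Prop := ∀ (tables : List String) (attribute_ : String), Dom_get_table_name tables attribute_ → Spec_get_table_name tables attribute_ (get_table_name tables attribute_)

-- ===== LEMMAS AND PROOFS =====

theorem scanBack_append (attribute_ : String) (l : List String) (x : String) :
    ∀ n, n ≤ l.length → scanBack (l ++ [x]) attribute_ n = scanBack l attribute_ n := by
  intro n
  induction n with
  | zero => intro _; rfl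
  | succ k ih =>
      intro hk
      have hkl : k < l.length := Nat.lt_of_succ_le hk
      simp only [scanBack, List.getElem?_append_left hkl, ih (Nat.le_of_lt hkl)]

theorem foldl_overwrite_eq_scanBack (attribute_ : String) (l : List String) :
    l.foldl (fun a t => if PySem.Str.startswith t attribute_ then t else a) "" =
      scanBack l attribute_ l.length := by
  induction l using List.reverseRecOn with
  | nil => rfl
  | append_singleton l x ih =>
      rw [List.foldl_append, List.foldl_cons, List.foldl_nil]
      have hlen : (l ++ [x]).length = l.length + 1 := by simp
      rw [hlen]
      simp only [scanBack, List.getElem?_append_right (Nat.le_refl _), Nat.sub_self,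
        List.getElem?_cons_zero]
      rw [scanBack_append attribute_ l x l.length (Nat.le_refl _), ← ih]

-- ===== VERDICT (by name: the statement is the Claim_ definition above) =====
theorem get_table_name_spec : Claim_equal_get_table_name := by
  intro tables attribute_ _
  unfold Spec_get_table_name get_table_name get_table_name_alt
  by_cases h : attribute_ == "lo"
  · simp [h]
  · simp only [h, Bool.false_eq_true, if_false]
    exact foldl_overwrite_eq_scanBack attribute_ tables
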